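-- pv_equiv track=rewrite | github.com/dorshamo/MLM | HW/hw1/HW1_Q2.py | double_dig_num
-- ===== SOURCE A (Python) =====
-- def double_dig_num(num):
--     temp_double = 0
--     double = 0
-- #while loop that take the two first number to check if thay are the same and every time move one digit left.
--     while num > 9:
--           two_digits = num%100
-- #if statement to check if the two numbers equal and save the digit.
--           if two_digits%11 == 0:
--              temp_double = two_digits%10
-- #if statement to take the bigest number that as double.
--              if temp_double > double:
--                  double = temp_double
-- #divides the number by 10 to seperate it from the unit digit.
--           num//=10
-- #return the bigest double.
--     return double
-- ===== SOURCE B (Python) =====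
-- def double_dig_num(num):
--     if num <= 9:
--         return 0
--     rest = num // 10
--     cand = num % 10 if num % 10 == rest % 10 else 0
--     return max(cand, double_dig_num(rest))
-- ===== Notes on version B (the rewrite author's own statement) =====
-- stated objective: simpler
-- what changed: Replaces A's iterative while-loop with temp_double/double accumulator state and the %100 %11 divisibility trick by a direct structural recursion on num//10 that compares the two lowest digits and folds with max.
import Mathlib
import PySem

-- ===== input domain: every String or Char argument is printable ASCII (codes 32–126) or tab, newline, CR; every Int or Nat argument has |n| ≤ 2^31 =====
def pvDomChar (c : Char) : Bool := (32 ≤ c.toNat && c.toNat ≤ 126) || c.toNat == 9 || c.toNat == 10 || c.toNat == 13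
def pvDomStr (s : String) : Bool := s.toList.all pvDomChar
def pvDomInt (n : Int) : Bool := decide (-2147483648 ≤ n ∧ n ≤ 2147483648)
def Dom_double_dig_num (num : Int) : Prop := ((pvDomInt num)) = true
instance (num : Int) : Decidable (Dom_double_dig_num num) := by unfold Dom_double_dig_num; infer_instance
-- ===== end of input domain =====

-- B replaces A's while-loop with accumulator state by a direct recursion on num//10 folded with max (objective: simpler).

-- ===== PORT A =====
-- the while-loop of A, with its two mutable accumulators temp_double and double
def double_dig_num_go (num temp_double double : Int) : Int :=
  if 9 < num then
    let two_digits := PySem.Int.mod num 100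
    if PySem.Int.mod two_digits 11 = 0 then
      let t := PySem.Int.mod two_digits 10
      double_dig_num_go (PySem.Int.floordiv num 10) t (if t > double then t else double)
    else
      double_dig_num_go (PySem.Int.floordiv num 10) temp_double double
  else double
termination_by num.toNat
decreasing_by
  all_goals
    simp only [PySem.Int.floordiv_eq_ediv_of_pos (by norm_num : (0:Int) < 10)]
    omega

def double_dig_num (num : Int) : Int := double_dig_num_go num 0 0

-- ===== PORT B =====
def double_dig_num_alt (num : Int) : Int :=
  if num ≤ 9 then 0
  else
    let rest := PySem.Int.floordiv num 10
    let cand := if PySem.Int.mod num 10 = PySem.Int.mod rest 10 then PySem.Int.mod num 10 else 0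
    max cand (double_dig_num_alt rest)
termination_by num.toNat
decreasing_by
  simp only [PySem.Int.floordiv_eq_ediv_of_pos (by norm_num : (0:Int) < 10)]
  omega

-- ===== PRECONDITION & SPEC =====
def Spec_double_dig_num (num : Int) (out : Int) : Prop := out = double_dig_num_alt num
instance (num : Int) (out : Int) : Decidable (Spec_double_dig_num num out) := by unfold Spec_double_dig_num; infer_instance

-- ===== CLAIM (what is proved, stated in full; the proofs are below) =====
def Claim_equal_double_dig_num : Prop := ∀ (num : Int), Dom_double_dig_num num → Spec_double_dig_num num (double_dig_num num)

-- ===== LEMMAS AND PROOFS =====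
theorem double_dig_num_go_eq (num temp_double double : Int) (hd : 0 ≤ double) :
    double_dig_num_go num temp_double double = max double (double_dig_num_alt num) := by
  by_cases h : 9 < num
  · have h10 : (0:Int) < 10 := by norm_num
    have h100 : (0:Int) < 100 := by norm_num
    have h11 : (0:Int) < 11 := by norm_num
    rw [double_dig_num_go, double_dig_num_alt]
    simp only [if_pos h, if_neg (by omega : ¬ num ≤ 9),
      PySem.Int.mod_eq_emod_of_pos h10, PySem.Int.mod_eq_emod_of_pos h100,
      PySem.Int.mod_eq_emod_of_pos h11, PySem.Int.floordiv_eq_ediv_of_pos h10]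
    have e1 : num % 100 = 10 * (num / 10 % 10) + num % 10 := by omega
    have hcond : num % 100 % 11 = 0 ↔ num % 10 = num / 10 % 10 := by omega
    have ht : num % 100 % 10 = num % 10 := by omega
    by_cases hc : num % 100 % 11 = 0
    · rw [if_pos hc, if_pos (hcond.mp hc)]
      have hd' : 0 ≤ if num % 100 % 10 > double then num % 100 % 10 else double := by
        split_ifs <;> omega
      rw [double_dig_num_go_eq _ _ _ hd', ht]
      by_cases h1 : num % 10 > double
      · rw [if_pos h1]; omega
      · rw [if_neg h1]; omega
    · rw [if_neg hc, if_neg (fun he => hc (hcond.mpr he))]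
      rw [double_dig_num_go_eq _ _ _ hd]
      omega
  · rw [double_dig_num_go, double_dig_num_alt, if_neg h, if_pos (by omega : num ≤ 9)]
    omega
termination_by num.toNat
decreasing_by
  all_goals omega

theorem double_dig_num_alt_nonneg (num : Int) : 0 ≤ double_dig_num_alt num := by
  rw [double_dig_num_alt]
  by_cases h : num ≤ 9
  · rw [if_pos h]
  · rw [if_neg h]
    have h10 : (0:Int) < 10 := by norm_num
    have := double_dig_num_alt_nonneg (PySem.Int.floordiv num 10)
    exact le_trans this (le_max_right _ _)
termination_by num.toNat
decreasing_by
  simp only [PySem.Int.floordiv_eq_ediv_of_pos (by norm_num : (0:Int) < 10)]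
  omega

-- ===== VERDICT (by name: the statement is the Claim_ definition above) =====
theorem double_dig_num_spec : Claim_equal_double_dig_num := by
  intro num _
  unfold Spec_double_dig_num double_dig_num
  rw [double_dig_num_go_eq num 0 0 le_rfl]
  exact max_eq_right (double_dig_num_alt_nonneg num)
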